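-- pv_equiv track=rewrite | github.com/ShapeLayer/training | tasks/online_judge/baekjoon/python/15664.py | compute
-- ===== SOURCE A (Python) =====
-- def compute(n: int, m: int, gets: list[int]) -> list[list[int]]:
--     buf: list[tuple[int]] = []
--     gets.sort()
--     def step(start: int, elapsed: int, values: list[int]):
--         if elapsed == m:
--             buf.append(tuple([gets[i] for i in values]))
--             return
--         for i in range(start, n):
--             step(i + 1, elapsed + 1, values + [i])
--     step(0, 0, [])
--
--     result: list[tuple[int]] = []
--     prev = [-1]
--     for each in sorted(buf):
--         if prev != each:
--             result.append(each)
--             prev = each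
--     return result
-- ===== SOURCE B (Python) =====
-- def compute(n: int, m: int, gets: list[int]) -> list[list[int]]:
--     # Sort once, then emit the distinct combinations directly in lexicographic
--     # order by skipping repeated values at each depth, with no global sort+dedup pass.
--     # Like A, this sorts `gets` in place; the equivalence is about the return value.
--     gets.sort()
--     vals = gets[:max(0, n)]
--     result: list[tuple[int, ...]] = []
--
--     def rec(start: int, chosen: tuple[int, ...]):
--         if len(chosen) == m:
--             result.append(chosen)
--             return
--         prev = None
--         for i in range(start, len(vals)):
--             v = vals[i]
--             if v != prev:
--                 prev = v
--                 rec(i + 1, chosen + (v,))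
--
--     rec(0, ())
--     return result
-- ===== Notes on version B (the rewrite author's own statement) =====
-- stated objective: alternative
-- what changed: A enumerates every index combination (C(n,m) of them, duplicates included), then sorts the whole list of tuples and removes adjacent duplicates; B sorts the input once and emits each distinct combination exactly once, already in lexicographic order, by skipping repeated values at each recursion depth, so the global sort and dedup passes disappear (it trades those passes for a pruned recursion; the win shows only on duplicate-heavy inputs).
import Mathlib
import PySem

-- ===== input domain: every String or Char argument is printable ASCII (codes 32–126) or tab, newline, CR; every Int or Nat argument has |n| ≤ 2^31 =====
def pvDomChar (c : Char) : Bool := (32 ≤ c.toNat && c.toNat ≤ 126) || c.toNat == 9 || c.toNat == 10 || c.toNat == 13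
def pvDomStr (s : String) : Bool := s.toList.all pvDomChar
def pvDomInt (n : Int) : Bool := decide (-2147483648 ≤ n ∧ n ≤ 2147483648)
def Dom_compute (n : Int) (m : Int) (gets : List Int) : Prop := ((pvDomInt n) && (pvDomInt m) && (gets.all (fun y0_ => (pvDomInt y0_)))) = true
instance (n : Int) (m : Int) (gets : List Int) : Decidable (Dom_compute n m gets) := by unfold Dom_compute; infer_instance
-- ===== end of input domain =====

-- B replaces A's enumerate-all-index-combinations + global sort + adjacent-dedup pipeline by a
-- single recursion over the sorted values that skips repeated values at each depth, emitting the
-- distinct combinations once each, already in order.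
-- Both Pythons sort `gets` in place; the equivalence proved here is about the return value.

-- ===== PORT A =====
-- A's inner `def step` together with its `for i in range(start, n)` loop, as one structural
-- recursion: the first recursive call is step(i+1, elapsed+1, values+[i]) for i = start, the
-- second is the remainder of the loop (same elapsed, start+1).
def computeStep (g : List Int) (n : Int) (m : Int) (fuel : Nat) (start : Int) (elapsed : Int) (values : List Int) : List (List Int) :=
  if elapsed = m then
    -- buf.append(tuple(gets[i] for i in values)); Pre_compute keeps every such i in range
    [values.map (fun i => PySem.List.pyGetD g i 0)]
  else if start < n then
    match fuel with
    | 0 => []  -- never reached: fuel = (n - start).toNat, positive when start < n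
    | fuel' + 1 =>
      computeStep g n m fuel' (start + 1) (elapsed + 1) (values ++ [start]) ++
        computeStep g n m fuel' (start + 1) elapsed values
  else []

def compute (n : Int) (m : Int) (gets : List Int) : List (List Int) :=
  let g := PySem.List.sorted gets (fun x => x) false        -- gets.sort()
  let buf := computeStep g n m n.toNat 0 0 []
  -- prev = [-1] is a Python *list*, never `==` any tuple in buf: modelled as `none`
  ((PySem.List.sorted buf (fun x => x) false).foldl
      (fun (st : Option (List Int) × List (List Int)) each =>
        if st.1 ≠ some each then (some each, st.2 ++ [each]) else st)
      (none, [])).2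

-- ===== PORT B =====
-- B's inner `def rec` together with its `for i in range(start, len(vals))` loop, as one
-- structural recursion: first call = rec(i+1, chosen+(v,)) (fresh loop, prev=None), second =
-- rest of the loop with prev = v, third branch = the skipped iteration (v == prev).
def computeRec (vals : List Int) (m : Int) (fuel : Nat) (start : Int) (chosen : List Int) (prev : Option Int) : List (List Int) :=
  if (chosen.length : Int) = m then [chosen]
  else if start < (vals.length : Int) then
    match fuel with
    | 0 => []  -- never reached: fuel = (vals.length - start).toNat, positive when start < length
    | fuel' + 1 =>
      let v := PySem.List.pyGetD vals start 0
      if prev ≠ some v then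
        computeRec vals m fuel' (start + 1) (chosen ++ [v]) none ++
          computeRec vals m fuel' (start + 1) chosen (some v)
      else computeRec vals m fuel' (start + 1) chosen prev
  else []

def compute_alt (n : Int) (m : Int) (gets : List Int) : List (List Int) :=
  let g := PySem.List.sorted gets (fun x => x) false        -- gets.sort()
  let vals := PySem.List.slice g none (some (max 0 n))      -- gets[:max(0, n)]
  computeRec vals m vals.length 0 [] none

-- ===== PRECONDITION & SPEC =====
-- Pre_ excludes exactly the inputs where A raises IndexError: 1 ≤ m ≤ n but gets shorter than n
-- (A indexes the sorted list at every position below n).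
def Pre_compute (n : Int) (m : Int) (gets : List Int) : Prop :=
  1 ≤ m → m ≤ n → n ≤ (gets.length : Int)
instance (n : Int) (m : Int) (gets : List Int) : Decidable (Pre_compute n m gets) := by
  unfold Pre_compute; infer_instance

def pvWitness_compute : Int × Int × List Int := (3, 2, [1, 2, 2])

def Spec_compute (n : Int) (m : Int) (gets : List Int) (out : List (List Int)) : Prop :=
  out = compute_alt n m gets
instance (n : Int) (m : Int) (gets : List Int) (out : List (List Int)) : Decidable (Spec_compute n m gets out) := by
  unfold Spec_compute; infer_instance

-- ===== CLAIM =====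
def Claim_equal_compute : Prop := ∀ (n : Int) (m : Int) (gets : List Int),
  Dom_compute n m gets → Pre_compute n m gets → Spec_compute n m gets (compute n m gets)

-- ===== LEMMAS AND PROOFS =====

-- A's final dedup loop, recursively (proof-side view of the foldl in `compute`).
def dedupRec : Option (List Int) → List (List Int) → List (List Int)
  | _, [] => []
  | p, x :: xs => if p ≠ some x then x :: dedupRec (some x) xs else dedupRec p xs

-- B's recursion, proof-side view over the remaining value segment: one level's loop with the
-- skip state `p`; the nested `if r - 1 = 0` is the inner rec's length test.
def DL : List Int → Option Int → Nat → List (List Int)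
  | [], _, _ => []
  | v :: s, p, r =>
    if p ≠ some v then
      ((if r - 1 = 0 then [[]] else DL s none (r - 1)).map (fun c => v :: c)) ++ DL s (some v) r
    else DL s p r

def DD (s : List Int) (r : Nat) : List (List Int) := if r = 0 then [[]] else DL s none r

lemma DL_cons (v : Int) (s : List Int) (p : Option Int) (r : Nat) :
    DL (v :: s) p r
      = (if p ≠ some v then
          ((if r - 1 = 0 then [[]] else DL s none (r - 1)).map (fun c => v :: c)) ++ DL s (some v) r
        else DL s p r) := rfl

lemma dedupRec_foldl (L : List (List Int)) : ∀ (p : Option (List Int)) (acc : List (List Int)),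
    (L.foldl (fun (st : Option (List Int) × List (List Int)) each =>
        if st.1 ≠ some each then (some each, st.2 ++ [each]) else st) (p, acc)).2
      = acc ++ dedupRec p L := by
  induction L with
  | nil => intro p acc; simp [dedupRec]
  | cons x xs ih =>
    intro p acc
    by_cases h : p ≠ some x
    · simp only [List.foldl_cons, dedupRec, if_pos h, ih]
      simp
    · simp only [List.foldl_cons, dedupRec, if_neg h, ih]

lemma sortedLL_pairwise (xs : List (List Int)) :
    (PySem.List.sorted xs (fun x => x) false).Pairwise (· ≤ ·) := by
  have h : (fun (a b : List Int) => a.decidableLT b)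
      = (fun a b => (LinearOrder.toDecidableLT : DecidableLT (List Int)) a b) := by
    funext a b; exact Subsingleton.elim _ _
  rw [show (@PySem.List.sorted (List ℤ) (List ℤ) List.instLT (fun a b => a.decidableLT b) xs (fun x => x) false)
      = @PySem.List.sorted (List ℤ) (List ℤ) _ LinearOrder.toDecidableLT xs (fun x => x) false from by rw [h]]
  exact PySem.List.sorted_pairwise xs _

lemma sortedInt_pairwise (xs : List Int) :
    (PySem.List.sorted xs (fun x => x) false).Pairwise (· ≤ ·) := by
  have h : (fun (a b : Int) => a.decLt b)
      = (fun a b => (LinearOrder.toDecidableLT : DecidableLT Int) a b) := by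
    funext a b; exact Subsingleton.elim _ _
  rw [show (@PySem.List.sorted ℤ ℤ Int.instLTInt (fun a b => a.decLt b) xs (fun x => x) false)
      = @PySem.List.sorted ℤ ℤ _ LinearOrder.toDecidableLT xs (fun x => x) false from by rw [h]]
  exact PySem.List.sorted_pairwise xs _

lemma dedupRec_spec (L : List (List Int)) : ∀ (p : Option (List Int)),
    L.Pairwise (· ≤ ·) → (∀ q, p = some q → ∀ x ∈ L, q ≤ x) →
    (∀ y, y ∈ dedupRec p L ↔ (y ∈ L ∧ p ≠ some y)) ∧ (dedupRec p L).Pairwise (· < ·) := by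
  induction L with
  | nil => intro p _ _; exact ⟨by simp [dedupRec], by simp [dedupRec]⟩
  | cons x xs ih =>
    intro p hL hp
    obtain ⟨hx, hxs⟩ := List.pairwise_cons.mp hL
    by_cases h : p ≠ some x
    · obtain ⟨ihm, ihp⟩ := ih (some x) hxs
        (by rintro q hq y hy; injection hq with hq; subst hq; exact hx y hy)
      constructor
      · intro y
        simp only [dedupRec, if_pos h, List.mem_cons]
        constructor
        · rintro (rfl | hy)
          · exact ⟨Or.inl rfl, h⟩
          · obtain ⟨hy1, hy2⟩ := (ihm y).mp hy
            refine ⟨Or.inr hy1, ?_⟩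
            rintro rfl
            exact hy2 (congrArg some (le_antisymm (hp y rfl x List.mem_cons_self) (hx y hy1)).symm)
        · rintro ⟨(rfl | hy), hne⟩
          · exact Or.inl rfl
          · by_cases hyx : y = x
            · exact Or.inl hyx
            · exact Or.inr ((ihm y).mpr ⟨hy, fun hc => hyx (Option.some.inj hc).symm⟩)
      · simp only [dedupRec, if_pos h]
        refine List.pairwise_cons.mpr ⟨?_, ihp⟩
        intro y hy
        obtain ⟨hy1, hy2⟩ := (ihm y).mp hy
        exact lt_of_le_of_ne (hx y hy1) (fun hc => hy2 (congrArg some hc))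
    · have h' : p = some x := not_not.mp h
      subst h'
      obtain ⟨ihm, ihp⟩ := ih (some x) hxs
        (fun q hq y hy => by injection hq with hq; subst hq; exact hx y hy)
      have hred : dedupRec (some x) (x :: xs) = dedupRec (some x) xs := by
        simp [dedupRec]
      rw [hred]
      refine ⟨?_, ihp⟩
      intro y
      rw [ihm y, List.mem_cons]
      constructor
      · rintro ⟨hy, hne⟩; exact ⟨Or.inr hy, hne⟩
      · rintro ⟨hy, hne⟩
        rcases hy with rfl | hy
        · exact absurd rfl hne
        · exact ⟨hy, hne⟩

-- A's recursion never reaches elapsed == m once elapsed is past m.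
lemma computeStep_of_lt (g : List Int) (n m : Int) : ∀ (fuel : Nat) (start elapsed : Int) (values : List Int),
    m < elapsed → computeStep g n m fuel start elapsed values = [] := by
  intro fuel
  induction fuel with
  | zero =>
    intro start elapsed values h
    simp only [computeStep, if_neg (by omega : ¬ elapsed = m)]
    split <;> rfl
  | succ f ih =>
    intro start elapsed values h
    simp only [computeStep, if_neg (by omega : ¬ elapsed = m)]
    split
    · rw [ih _ _ _ (by omega), ih _ _ _ (by omega)]; rfl
    · rfl

-- A's recursion enumerates the index combinations in CPython's order.
lemma computeStep_eq (g : List Int) (n m : Int) : ∀ (fuel : Nat) (start elapsed : Int) (values : List Int),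
    (n - start).toNat ≤ fuel → elapsed ≤ m →
    computeStep g n m fuel start elapsed values
      = (PySem.List.combinations (PySem.List.pyRange start n) ((m - elapsed).toNat)).map
          (fun ids => (values ++ ids).map (fun i => PySem.List.pyGetD g i 0)) := by
  intro fuel
  induction fuel with
  | zero =>
    intro start elapsed values hf he
    have hns : n ≤ start := by omega
    rcases eq_or_lt_of_le he with rfl | hlt
    · simp [computeStep, PySem.List.combinations_zero]
    · obtain ⟨k, hk⟩ : ∃ k, (m - elapsed).toNat = k + 1 := ⟨(m - elapsed).toNat - 1, by omega⟩
      rw [PySem.List.pyRange_one_eq_nil hns, hk, PySem.List.combinations_nil_succ]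
      simp only [computeStep, if_neg (by omega : ¬ elapsed = m), if_neg (by omega : ¬ start < n)]
      rfl
  | succ f ih =>
    intro start elapsed values hf he
    rcases eq_or_lt_of_le he with rfl | hlt
    · simp [computeStep, PySem.List.combinations_zero]
    · obtain ⟨k, hk⟩ : ∃ k, (m - elapsed).toNat = k + 1 := ⟨(m - elapsed).toNat - 1, by omega⟩
      by_cases hsn : start < n
      · simp only [computeStep, if_neg (by omega : ¬ elapsed = m), if_pos hsn]
        rw [ih _ _ _ (by omega) (by omega), ih _ _ _ (by omega) (by omega),
          PySem.List.pyRange_one_cons hsn, hk, PySem.List.combinations_cons_succ,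
          List.map_append, List.map_map]
        congr 1
        · have hk' : (m - (elapsed + 1)).toNat = k := by omega
          rw [hk']
          apply List.map_congr_left
          intro ids _
          simp only [Function.comp_def, List.append_assoc, List.singleton_append]
      · rw [PySem.List.pyRange_one_eq_nil (by omega), hk, PySem.List.combinations_nil_succ]
        simp only [computeStep, if_neg (by omega : ¬ elapsed = m), if_neg hsn]
        rfl

lemma map_pyGetD_range_take (g : List Int) (n : Int) (h0 : 0 ≤ n) (hn : n ≤ (g.length : Int)) :
    (PySem.List.pyRange 0 n).map (fun i => PySem.List.pyGetD g i 0) = g.take n.toNat := by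
  apply List.ext_getElem
  · simp only [List.length_map, PySem.List.length_pyRange_one, List.length_take]
    omega
  · intro i h1 h2
    simp only [List.getElem_map, List.getElem_take]
    have hlen : i < (PySem.List.pyRange 0 n).length := by
      simpa using h1
    rw [PySem.List.getElem_pyRange_one 0 n i hlen]
    have hi : i < g.length := by
      simp only [PySem.List.length_pyRange_one] at hlen; omega
    rw [PySem.List.pyGetD_eq_getElem g 0 (by omega) (by omega)]
    congr 1
    omega

lemma computeRec_neg (vals : List Int) (m : Int) (hm : m < 0) : ∀ (fuel : Nat) (start : Int) (chosen : List Int) (prev : Option Int),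
    computeRec vals m fuel start chosen prev = [] := by
  intro fuel
  induction fuel with
  | zero =>
    intro start chosen prev
    simp only [computeRec, if_neg (by omega : ¬ (chosen.length : Int) = m)]
    split <;> rfl
  | succ f ih =>
    intro start chosen prev
    simp only [computeRec, if_neg (by omega : ¬ (chosen.length : Int) = m)]
    split
    · split
      · rw [ih, ih]; rfl
      · rw [ih]
    · rfl

lemma computeRec_eq (vals : List Int) (m : Int) : ∀ (fuel : Nat) (start : Int) (chosen : List Int) (prev : Option Int),
    ((vals.length : Int) - start).toNat ≤ fuel → 0 ≤ start → (chosen.length : Int) < m →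
    computeRec vals m fuel start chosen prev
      = (DL (vals.drop start.toNat) prev ((m - chosen.length).toNat)).map (fun c => chosen ++ c) := by
  intro fuel
  induction fuel with
  | zero =>
    intro start chosen prev hf h0 hm
    have hd : vals.drop start.toNat = [] := List.drop_eq_nil_of_le (by omega)
    rw [hd]
    simp only [computeRec, if_neg (by omega : ¬ (chosen.length : Int) = m),
      if_neg (by omega : ¬ start < (vals.length : Int)), DL]
    rfl
  | succ f ih =>
    intro start chosen prev hf h0 hm
    by_cases hs : start < (vals.length : Int)
    · have hlt : start.toNat < vals.length := by omega
      have hd : vals.drop start.toNat = vals[start.toNat] :: vals.drop (start.toNat + 1) :=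
        List.drop_eq_getElem_cons hlt
      have hv : PySem.List.pyGetD vals start 0 = vals[start.toNat] :=
        PySem.List.pyGetD_eq_getElem vals 0 h0 (by omega)
      have hsucc : (start + 1).toNat = start.toNat + 1 := by omega
      rw [hd, DL_cons]
      simp only [computeRec, if_neg (by omega : ¬ (chosen.length : Int) = m), if_pos hs, hv]
      by_cases hp : prev ≠ some vals[start.toNat]
      · rw [if_pos hp, if_pos hp, List.map_append]
        congr 1
        · by_cases h1 : (chosen.length : Int) + 1 = m
          · have hr1 : (m - chosen.length).toNat - 1 = 0 := by omega
            rw [if_pos hr1]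
            have hc : (((chosen ++ [vals[start.toNat]]).length : Nat) : Int) = m := by
              simp only [List.length_append, List.length_cons, List.length_nil]
              push_cast; omega
            have hone : computeRec vals m f (start + 1) (chosen ++ [vals[start.toNat]]) none
                = [chosen ++ [vals[start.toNat]]] := by
              unfold computeRec
              rw [if_pos hc]
            rw [hone]
            simp
          · have hr1 : ¬ ((m - chosen.length).toNat - 1 = 0) := by omega
            rw [if_neg hr1]
            have hlen2 : ((chosen ++ [vals[start.toNat]]).length : Int) < m := by
              simp only [List.length_append, List.length_cons, List.length_nil]
              push_cast; omega
            rw [ih (start + 1) (chosen ++ [vals[start.toNat]]) none (by omega) (by omega) hlen2,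
              hsucc]
            have hlen : ((m : Int) - ((chosen ++ [vals[start.toNat]]).length : Nat)).toNat
                = (m - chosen.length).toNat - 1 := by
              simp only [List.length_append, List.length_cons, List.length_nil]
              push_cast; omega
            rw [hlen, List.map_map]
            apply List.map_congr_left
            intro c _
            simp only [Function.comp_def, List.append_assoc, List.singleton_append]
        · rw [ih (start + 1) chosen (some vals[start.toNat]) (by omega) (by omega) hm, hsucc]
      · rw [if_neg hp, if_neg hp]
        have hp' : prev = some vals[start.toNat] := not_not.mp hp
        rw [ih (start + 1) chosen prev (by omega) (by omega) hm, hsucc, hp']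
    · have hd : vals.drop start.toNat = [] := List.drop_eq_nil_of_le (by omega)
      rw [hd]
      simp only [computeRec, if_neg (by omega : ¬ (chosen.length : Int) = m), if_neg hs, DL]
      rfl

lemma DL_spec : ∀ (s : List Int) (p : Option Int) (r : Nat), 1 ≤ r → s.Pairwise (· ≤ ·) →
    (∀ q, p = some q → ∀ x ∈ s, q ≤ x) →
    (∀ y, y ∈ DL s p r ↔ (y.Sublist s ∧ y.length = r ∧ ∀ q, p = some q → y.head? ≠ some q))
    ∧ (DL s p r).Pairwise (· < ·) := by
  intro s
  induction s with
  | nil =>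
    intro p r hr _ _
    constructor
    · intro y
      simp only [DL, List.not_mem_nil, false_iff]
      rintro ⟨hsub, hlen, -⟩
      rw [List.sublist_nil.mp hsub] at hlen
      simp at hlen; omega
    · simp [DL]
  | cons v s ih =>
    intro p r hr hs hp
    obtain ⟨hv, hs'⟩ := List.pairwise_cons.mp hs
    have hG1mem : ∀ c, c ∈ (if r - 1 = 0 then [[]] else DL s none (r - 1))
        ↔ (c.Sublist s ∧ c.length = r - 1) := by
      by_cases h0 : r - 1 = 0
      · rw [if_pos h0, h0]
        intro c
        simp only [List.mem_singleton]
        constructor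
        · rintro rfl; exact ⟨List.nil_sublist s, rfl⟩
        · rintro ⟨-, hlen⟩; exact List.length_eq_zero_iff.mp hlen
      · rw [if_neg h0]
        intro c
        rw [(ih none (r - 1) (by omega) hs' (by rintro q ⟨⟩)).1 c]
        simp
    have hG1pw : (if r - 1 = 0 then [[]] else DL s none (r - 1)).Pairwise
        (fun (a b : List Int) => a < b) := by
      by_cases h0 : r - 1 = 0
      · rw [if_pos h0]; simp
      · rw [if_neg h0]
        exact (ih none (r - 1) (by omega) hs' (by rintro q ⟨⟩)).2
    have hG2 := ih (some v) r hr hs'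
      (by rintro q hq x hx; injection hq with hq; subst hq; exact hv x hx)
    by_cases hpv : p ≠ some v
    · rw [DL_cons, if_pos hpv]
      constructor
      · intro y
        rw [List.mem_append, List.mem_map]
        constructor
        · rintro (⟨c, hc, rfl⟩ | hy)
          · obtain ⟨hc1, hc2⟩ := (hG1mem c).mp hc
            refine ⟨List.cons_sublist_cons.mpr hc1, by simp [hc2]; omega, ?_⟩
            intro q hq heq
            apply hpv
            rw [hq]
            simp only [List.head?_cons] at heq
            rw [Option.some.inj heq]
          · obtain ⟨hy1, hy2, hy3⟩ := (hG2.1 y).mp hy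
            refine ⟨hy1.cons v, hy2, ?_⟩
            obtain ⟨h, t, rfl⟩ : ∃ h t, y = h :: t := by
              cases y with
              | nil => simp at hy2; omega
              | cons a b => exact ⟨a, b, rfl⟩
            intro q hq heq
            simp only [List.head?_cons] at heq
            have hq' : h = q := Option.some.inj heq
            have hhs : h ∈ s := hy1.subset List.mem_cons_self
            have hhv : h ≠ v := by
              intro he
              exact hy3 v rfl (by simp [he])
            have h1 : q ≤ v := hp q hq v List.mem_cons_self
            have h2 : v ≤ h := hv h hhs
            omega
        · rintro ⟨hsub, hlen, hhead⟩
          obtain ⟨h, t, rfl⟩ : ∃ h t, y = h :: t := by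
            cases y with
            | nil => simp at hlen; omega
            | cons a b => exact ⟨a, b, rfl⟩
          rcases List.sublist_cons_iff.mp hsub with hys | ⟨t', heq, ht'⟩
          · by_cases hhv : h = v
            · subst hhv
              have ht : t.Sublist s := (List.sublist_cons_self h t).trans hys
              exact Or.inl ⟨t, (hG1mem t).mpr ⟨ht, by simp at hlen; omega⟩, rfl⟩
            · refine Or.inr ((hG2.1 _).mpr ⟨hys, hlen, ?_⟩)
              intro q hq
              injection hq with hq
              subst hq
              simp only [List.head?_cons, ne_eq, Option.some.injEq]
              exact hhv
          · obtain ⟨rfl, rfl⟩ : h = v ∧ t = t' := by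
              have := List.cons.injEq h t v t' ▸ heq
              exact ⟨by injection heq, by injection heq⟩
            exact Or.inl ⟨t, (hG1mem t).mpr ⟨ht', by simp at hlen; omega⟩, rfl⟩
      · refine List.pairwise_append.mpr ⟨?_, hG2.2, ?_⟩
        · exact hG1pw.map _ (fun a b hab => List.cons_lt_cons_iff.mpr (Or.inr ⟨rfl, hab⟩))
        · rintro a ha b hb
          obtain ⟨c, -, rfl⟩ := List.mem_map.mp ha
          obtain ⟨hb1, hb2, hb3⟩ := (hG2.1 b).mp hb
          obtain ⟨h, t, rfl⟩ : ∃ h t, b = h :: t := by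
            cases b with
            | nil => simp at hb2; omega
            | cons a' b' => exact ⟨a', b', rfl⟩
          have hhs : h ∈ s := hb1.subset List.mem_cons_self
          have hhv : h ≠ v := by
            intro he
            exact hb3 v rfl (by simp [he])
          exact List.cons_lt_cons_iff.mpr (Or.inl (lt_of_le_of_ne (hv h hhs) (Ne.symm hhv)))
    · have hp' : p = some v := not_not.mp hpv
      obtain ⟨ihm, ihp⟩ := ih p r hr hs' (fun q hq x hx => hp q hq x (List.mem_cons_of_mem _ hx))
      rw [DL_cons, if_neg hpv]
      refine ⟨?_, ihp⟩
      intro y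
      rw [ihm y]
      constructor
      · rintro ⟨hsub, hlen, hhead⟩
        exact ⟨hsub.cons v, hlen, hhead⟩
      · rintro ⟨hsub, hlen, hhead⟩
        obtain ⟨h, t, rfl⟩ : ∃ h t, y = h :: t := by
          cases y with
          | nil => simp at hlen; omega
          | cons a b => exact ⟨a, b, rfl⟩
        have hhv : h ≠ v := by
          intro he
          apply hhead v hp'
          simp [he]
        rcases List.sublist_cons_iff.mp hsub with hys | ⟨t', heq, ht'⟩
        · exact ⟨hys, hlen, hhead⟩
        · exfalso; apply hhv; injection heq

lemma DD_spec (s : List Int) (r : Nat) (hs : s.Pairwise (· ≤ ·)) :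
    (∀ y, y ∈ DD s r ↔ (y.Sublist s ∧ y.length = r)) ∧ (DD s r).Pairwise (· < ·) := by
  unfold DD
  by_cases h0 : r = 0
  · rw [if_pos h0, h0]
    refine ⟨?_, by simp⟩
    intro y
    simp only [List.mem_singleton]
    constructor
    · rintro rfl; exact ⟨List.nil_sublist s, rfl⟩
    · rintro ⟨-, hlen⟩; exact List.length_eq_zero_iff.mp hlen
  · rw [if_neg h0]
    obtain ⟨hm, hp⟩ := DL_spec s none r (by omega) hs (by rintro q ⟨⟩)
    refine ⟨?_, hp⟩
    intro y
    rw [hm y]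
    simp

-- the heart: adjacent-dedup of the sorted full enumeration = the duplicate-skipping enumeration
lemma main_eq (t : List Int) (r : Nat) (ht : t.Pairwise (· ≤ ·)) :
    dedupRec none (PySem.List.sorted (PySem.List.combinations t r) (fun x => x) false) = DD t r := by
  obtain ⟨hBmem, hBpw⟩ := DD_spec t r ht
  have hLpw := sortedLL_pairwise (PySem.List.combinations t r)
  obtain ⟨hAmem, hApw⟩ := dedupRec_spec _ none hLpw (by rintro q ⟨⟩)
  have ndA := List.Pairwise.imp (fun {a b} (h : a < b) => ne_of_lt h) hApw
  have ndB := List.Pairwise.imp (fun {a b} (h : a < b) => ne_of_lt h) hBpw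
  refine List.Perm.eq_of_pairwise (le := (· < ·))
    (fun a b _ _ hab hba => absurd hba (lt_asymm hab)) hApw hBpw ?_
  refine (List.perm_ext_iff_of_nodup ndA ndB).mpr ?_
  intro y
  rw [hAmem y, hBmem y, PySem.List.mem_sorted]
  simp [PySem.List.mem_combinations_iff]

-- ===== VERDICT =====
theorem compute_spec : Claim_equal_compute := by
  unfold Claim_equal_compute Spec_compute
  intro n m gets _ hpre
  unfold Pre_compute at hpre
  simp only [compute, compute_alt]
  have hglen : (PySem.List.sorted gets (fun x => x) false).length = gets.length :=
    PySem.List.length_sorted _ _ _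
  have hgpw : (PySem.List.sorted gets (fun x => x) false).Pairwise (· ≤ ·) :=
    sortedInt_pairwise gets
  set g := PySem.List.sorted gets (fun x => x) false with hgdef
  have hvals : PySem.List.slice g none (some (max 0 n)) = g.take (max 0 n).toNat :=
    PySem.List.slice_to g (by omega)
  rw [dedupRec_foldl, hvals]
  simp only [List.nil_append]
  rcases lt_trichotomy m 0 with hm | hm | hm
  · -- m < 0 : both sides are []
    rw [computeStep_of_lt g n m _ _ _ _ hm, computeRec_neg _ _ hm]
    rfl
  · -- m = 0 : both sides are [[]]
    subst hm
    have hA : computeStep g n 0 n.toNat 0 0 [] = [[]] := by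
      unfold computeStep
      rw [if_pos rfl]
      rfl
    rw [hA]
    have hB : ∀ (fuel : Nat), computeRec (g.take (max 0 n).toNat) 0 fuel 0 [] none = [[]] := by
      intro fuel
      unfold computeRec
      rw [if_pos (by simp)]
    rw [hB]
    rfl
  · -- 0 < m
    rw [computeStep_eq g n m n.toNat 0 0 [] (by omega) (by omega)]
    simp only [Int.sub_zero, List.nil_append]
    by_cases hn : n < 0
    · -- empty range on both sides
      obtain ⟨k, hk⟩ : ∃ k, m.toNat = k + 1 := ⟨m.toNat - 1, by omega⟩
      rw [PySem.List.pyRange_one_eq_nil (by omega), hk, PySem.List.combinations_nil_succ]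
      have hmax : (max 0 n).toNat = 0 := by omega
      rw [hmax, List.take_zero]
      have hB : computeRec ([] : List Int) m ([] : List Int).length 0 [] none = [] := by
        unfold computeRec
        rw [if_neg (by simp; omega), if_neg (by simp)]
      rw [hB]
      rfl
    · by_cases hnl : n ≤ (gets.length : Int)
      · -- the main case: both sides are about t = g.take n.toNat
        have hmax : max 0 n = n := by omega
        rw [hmax]
        have htake : (PySem.List.pyRange 0 n).map (fun i => PySem.List.pyGetD g i 0)
            = g.take n.toNat := map_pyGetD_range_take g n (by omega) (by omega)
        rw [show (List.map (fun ids => List.map (fun i => PySem.List.pyGetD g i 0) ids)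
              (PySem.List.combinations (PySem.List.pyRange 0 n) m.toNat))
            = PySem.List.combinations (g.take n.toNat) m.toNat from by
          rw [← htake, ← PySem.List.combinations_map]]
        have ht : (g.take n.toNat).Pairwise (· ≤ ·) :=
          List.Pairwise.sublist (List.take_sublist _ _) hgpw
        rw [computeRec_eq _ m _ 0 [] none (by omega) (by omega) (by simpa using hm)]
        simp only [Int.toNat_zero, List.drop_zero, List.length_nil, Nat.cast_zero, Int.sub_zero,
          List.nil_append, List.map_id']
        rw [show DL (g.take n.toNat) none m.toNat = DD (g.take n.toNat) m.toNat from by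
          unfold DD; rw [if_neg (by omega)]]
        exact main_eq _ _ ht
      · -- n exceeds the list: Pre gives n < m, both sides are []
        have hnm : n < m := by
          by_contra h
          exact hnl (hpre (by omega) (by omega))
        rw [PySem.List.combinations_eq_nil_of_length_lt _
          (by rw [PySem.List.length_pyRange_one]; omega)]
        have ht : (g.take (max 0 n).toNat).Pairwise (· ≤ ·) :=
          List.Pairwise.sublist (List.take_sublist _ _) hgpw
        rw [computeRec_eq _ m _ 0 [] none (by omega) (by omega) (by simpa using hm)]
        simp only [Int.toNat_zero, List.drop_zero, List.length_nil, Nat.cast_zero, Int.sub_zero,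
          List.nil_append, List.map_id']
        rw [show DL (g.take (max 0 n).toNat) none m.toNat
            = DD (g.take (max 0 n).toNat) m.toNat from by
          unfold DD; rw [if_neg (by omega)]]
        rw [List.map_nil, show dedupRec none (PySem.List.sorted [] (fun x => x) false) = [] from rfl]
        symm
        rw [List.eq_nil_iff_forall_not_mem]
        intro y hy
        obtain ⟨hsub, hlen⟩ := ((DD_spec _ m.toNat ht).1 y).mp hy
        have h1 : y.length ≤ (g.take (max 0 n).toNat).length := hsub.length_le
        have h2 : (g.take (max 0 n).toNat).length ≤ g.length := by
          simp [List.length_take]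
        omega
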